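-- pv_equiv track=rewrite | github.com/MorRue/Masterarbeit | display_grid_peeling_of_vector_parabolas.py | getAllData
-- ===== SOURCE A (Python) =====
-- def getAllData(plotX,plotY):
--     xData= [0]
--     yData= [0]
--
--     rightSideX = plotX[int((len(plotX)-1)/2):len(plotX)]
--     rightSideY = plotY[int((len(plotY)-1)/2):len(plotY)]
--
--     #s = [[x,y,grad]]
--     for i in range(0,len(rightSideX)-1):
--         curX,curY = xData[-1],yData[-1]
--         rangeX = int(rightSideX[i+1])-int(rightSideX[i])  #deltaX
--         rangeY = int(rightSideY[i+1])-int(rightSideY[i])  #deltaY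
--         for x in range(1,rangeX+1):
--             xData.append(curX+x)
--             for y in range(0,rangeY+1):
--                 if(curY*rangeX + x*rangeY <= (curY+y)*rangeX):
--                     yData.append(curY+y)
--                     break
--     x = []
--     y = []
--
--     for i in range(len(xData)-1,0,-1):
--         x.append(xData[i]*-1)
--         y.append(yData[i])
--     for i in range(0,len(xData)):
--         x.append(xData[i])
--         y.append(yData[i])
--     return x,y
-- ===== SOURCE B (Python) =====
-- def getAllData(plotX, plotY):
--     # closed-form y: y = ceil(x*dy/dx) replaces the inner linear search of A
--     rx = plotX[(len(plotX) - 1) // 2 if plotX else 0:]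
--     ry = plotY[(len(plotY) - 1) // 2 if plotY else 0:]
--     xs = [0]
--     ys = [0]
--     for i in range(len(rx) - 1):
--         dx = rx[i + 1] - rx[i]
--         dy = ry[i + 1] - ry[i]
--         if dx > 0:
--             bx, by = xs[-1], ys[-1]
--             xs.extend(bx + x for x in range(1, dx + 1))
--             ys.extend(by + (x * dy + dx - 1) // dx for x in range(1, dx + 1))
--     x = [-v for v in reversed(xs[1:])] + xs
--     y = list(reversed(ys[1:])) + ys
--     return x, y
-- ===== Notes on version B (the rewrite author's own statement) =====
-- stated objective: faster
-- what changed: B replaces A's inner linear search over y in range(rangeY+1) by the closed-form ceiling y = (x*rangeY + rangeX - 1)//rangeX and extends the point lists per segment, building the mirrored output with reversed slices instead of index loops.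
import Mathlib
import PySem

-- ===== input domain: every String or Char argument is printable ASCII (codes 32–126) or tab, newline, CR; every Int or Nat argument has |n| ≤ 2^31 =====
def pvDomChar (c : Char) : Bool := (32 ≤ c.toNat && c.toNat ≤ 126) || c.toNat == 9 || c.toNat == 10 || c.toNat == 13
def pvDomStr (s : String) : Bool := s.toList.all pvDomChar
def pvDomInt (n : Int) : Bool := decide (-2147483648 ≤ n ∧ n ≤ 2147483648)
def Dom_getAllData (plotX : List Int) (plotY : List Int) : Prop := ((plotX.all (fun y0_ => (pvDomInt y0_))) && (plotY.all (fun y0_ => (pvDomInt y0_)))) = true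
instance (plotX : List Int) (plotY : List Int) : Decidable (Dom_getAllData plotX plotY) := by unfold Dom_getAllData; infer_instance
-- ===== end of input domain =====

-- B replaces A's inner linear search for y by the closed form y = ceil(x*dy/dx) (objective: faster, asymptotic).

-- ===== PORT A =====
-- inner 'for y in range(0, rangeY+1): if …: yData.append(curY+y); break'
def aFindY (curY rX rY x : Int) : List Int → Option Int
  | [] => none
  | y :: rest =>
      if curY * rX + x * rY ≤ (curY + y) * rX then some (curY + y)
      else aFindY curY rX rY x rest

-- inner 'for x in range(1, rangeX+1)'
def aLoopX (curX curY rX rY : Int) : List Int → List Int × List Int → List Int × List Int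
  | [], st => st
  | x :: rest, (xs, ys) =>
      let xs' := xs ++ [curX + x]
      let ys' := match aFindY curY rX rY x (PySem.List.pyRange 0 (rY + 1) 1) with
        | some v => ys ++ [v]
        | none => ys
      aLoopX curX curY rX rY rest (xs', ys')

-- outer 'for i in range(0, len(rightSideX)-1)'
def aLoopI (rX rY : List Int) : List Int → List Int × List Int → List Int × List Int
  | [], st => st
  | i :: rest, (xs, ys) =>
      let curX := PySem.List.pyGetD xs (-1) 0
      let curY := PySem.List.pyGetD ys (-1) 0
      let dX := PySem.List.pyGetD rX (i + 1) 0 - PySem.List.pyGetD rX i 0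
      let dY := PySem.List.pyGetD rY (i + 1) 0 - PySem.List.pyGetD rY i 0
      aLoopI rX rY rest (aLoopX curX curY dX dY (PySem.List.pyRange 1 (dX + 1) 1) (xs, ys))

-- Python's int((len(l)-1)/2) equals Nat (len-1)/2: for len ≥ 1 truncation = floor on a nonnegative
-- exact float, and for len = 0 both give 0 (int(-0.5) = 0, Nat 0-1 = 0).
def getAllData (plotX : List Int) (plotY : List Int) : List Int × List Int :=
  let rX := PySem.List.slice plotX (some (((plotX.length - 1) / 2 : Nat) : Int)) (some (plotX.length : Int))
  let rY := PySem.List.slice plotY (some (((plotY.length - 1) / 2 : Nat) : Int)) (some (plotY.length : Int))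
  let st := aLoopI rX rY (PySem.List.pyRange 0 ((rX.length : Int) - 1) 1) ([0], [0])
  let xData := st.1
  let yData := st.2
  -- 'for i in range(len(xData)-1, 0, -1)' then 'for i in range(0, len(xData))'
  -- (indexing via pyGetD: in-range under Pre_, where len(yData) = len(xData))
  let xy1 := (PySem.List.pyRange ((xData.length : Int) - 1) 0 (-1)).foldl
      (fun (acc : List Int × List Int) i =>
        (acc.1 ++ [PySem.List.pyGetD xData i 0 * -1], acc.2 ++ [PySem.List.pyGetD yData i 0])) ([], [])
  (PySem.List.pyRange 0 (xData.length : Int) 1).foldl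
      (fun (acc : List Int × List Int) i =>
        (acc.1 ++ [PySem.List.pyGetD xData i 0], acc.2 ++ [PySem.List.pyGetD yData i 0])) xy1

-- ===== PORT B =====
-- 'for i in range(len(rx)-1)': one extend per segment, y from the closed form (x*dy + dx - 1)//dx
def bLoopI (rX rY : List Int) : List Nat → List Int × List Int → List Int × List Int
  | [], st => st
  | i :: rest, (xs, ys) =>
      let dx := rX.getD (i + 1) 0 - rX.getD i 0
      let dy := rY.getD (i + 1) 0 - rY.getD i 0
      let st' :=
        if 0 < dx then
          let bx := PySem.List.pyGetD xs (-1) 0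
          let by_ := PySem.List.pyGetD ys (-1) 0
          (xs ++ (PySem.List.pyRange 1 (dx + 1) 1).map (fun x => bx + x),
           ys ++ (PySem.List.pyRange 1 (dx + 1) 1).map
              (fun x => by_ + PySem.Int.floordiv (x * dy + dx - 1) dx))
        else (xs, ys)
      bLoopI rX rY rest st'

def getAllData_alt (plotX : List Int) (plotY : List Int) : List Int × List Int :=
  -- plotX[s:] with 0 ≤ s ≤ len is drop s; s = (len-1)//2 guarded to 0 on the empty list (Nat (0-1)/2 = 0)
  let rX := plotX.drop ((plotX.length - 1) / 2)
  let rY := plotY.drop ((plotY.length - 1) / 2)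
  let st := bLoopI rX rY (List.range (rX.length - 1)) ([0], [0])
  let xs := st.1
  let ys := st.2
  ((xs.drop 1).reverse.map (fun v => -v) ++ xs, (ys.drop 1).reverse ++ ys)

-- ===== PRECONDITION & SPEC =====
-- Pre_ excludes exactly the inputs where A raises IndexError: a segment index i+1 beyond the right half
-- of plotY, or a segment with rangeX > 0 and rangeY < 0 (there the inner y-loop appends nothing, so the
-- final mirror loop indexes yData out of range).
def Pre_getAllData (plotX : List Int) (plotY : List Int) : Prop :=
  let rX := plotX.drop ((plotX.length - 1) / 2)
  let rY := plotY.drop ((plotY.length - 1) / 2)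
  ∀ i < rX.length - 1,
    i + 1 < rY.length ∧
    ¬(0 < rX.getD (i + 1) 0 - rX.getD i 0 ∧ rY.getD (i + 1) 0 - rY.getD i 0 < 0)
instance (plotX : List Int) (plotY : List Int) : Decidable (Pre_getAllData plotX plotY) := by
  unfold Pre_getAllData; infer_instance

def pvWitness_getAllData : List Int × List Int := ([0, 2, 5], [0, 1, 4])

def Spec_getAllData (plotX : List Int) (plotY : List Int) (out : List Int × List Int) : Prop := out = getAllData_alt plotX plotY
instance (plotX : List Int) (plotY : List Int) (out : List Int × List Int) : Decidable (Spec_getAllData plotX plotY out) := by unfold Spec_getAllData; infer_instance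

-- ===== CLAIM (what is proved, stated in full; the proofs are below) =====
def Claim_equal_getAllData : Prop := ∀ (plotX : List Int) (plotY : List Int), Dom_getAllData plotX plotY → Pre_getAllData plotX plotY → Spec_getAllData plotX plotY (getAllData plotX plotY)

-- ===== LEMMAS AND PROOFS =====

-- linear search from a: first hit is c (characterised by hc1/hc2)
theorem aFindY_from (curY dx dy x c : Int) (_hdx : 0 < dx)
    (hc1 : x * dy ≤ c * dx) (hc2 : ∀ y : Int, y < c → y * dx < x * dy) (hcd : c ≤ dy) :
    ∀ (n : Nat) (a : Int), (dy + 1 - a).toNat = n → a ≤ c →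
    aFindY curY dx dy x (PySem.List.pyRange a (dy + 1) 1) = some (curY + c) := by
  intro n
  induction n with
  | zero => intro a hn ha; exfalso; omega
  | succ m ih =>
      intro a hn ha
      have hlt : a < dy + 1 := by omega
      rw [PySem.List.pyRange_one_cons hlt]
      by_cases hac : a = c
      · subst hac
        have hcond : curY * dx + x * dy ≤ (curY + a) * dx := by nlinarith
        simp [aFindY, hcond]
      · have hac' : a < c := lt_of_le_of_ne ha hac
        have hy := hc2 a hac'
        have hcond : ¬ (curY * dx + x * dy ≤ (curY + a) * dx) := by nlinarith
        simp only [aFindY, if_neg hcond]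
        exact ih (a + 1) (by omega) (by omega)

-- the closed-form ceiling c = (x*dy + dx - 1) // dx is exactly the first y with x*dy ≤ y*dx
theorem aFindY_closed (curY dx dy x : Int) (hdx : 0 < dx) (hdy : 0 ≤ dy)
    (hx1 : 1 ≤ x) (hx2 : x ≤ dx) :
    aFindY curY dx dy x (PySem.List.pyRange 0 (dy + 1) 1) =
      some (curY + PySem.Int.floordiv (x * dy + dx - 1) dx) := by
  have hq0 : 0 ≤ x * dy := mul_nonneg (by omega) hdy
  rw [PySem.Int.floordiv_eq_ediv_of_pos hdx]
  set c : Int := (x * dy + dx - 1) / dx with hc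
  have hdm := Int.mul_ediv_add_emod (x * dy + dx - 1) dx
  have hr0 : 0 ≤ (x * dy + dx - 1) % dx := Int.emod_nonneg _ (by omega)
  have hr1 : (x * dy + dx - 1) % dx < dx := Int.emod_lt_of_pos _ hdx
  have hcdx : c * dx = x * dy + dx - 1 - (x * dy + dx - 1) % dx := by
    rw [mul_comm]; linarith
  have hc1 : x * dy ≤ c * dx := by linarith
  have hc2 : ∀ y : Int, y < c → y * dx < x * dy := by
    intro y hy
    have h2 : y * dx ≤ (c - 1) * dx :=
      mul_le_mul_of_nonneg_right (by omega) (by omega)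
    have h3 : (c - 1) * dx = c * dx - dx := by ring
    linarith
  have hqd : x * dy ≤ dx * dy := mul_le_mul_of_nonneg_right hx2 hdy
  have hcd : c ≤ dy := by
    by_contra hcon
    rw [not_le] at hcon
    have h4 : (dy + 1) * dx ≤ c * dx :=
      mul_le_mul_of_nonneg_right (by omega) (by omega)
    have h5 : (dy + 1) * dx = dx * dy + dx := by ring
    linarith
  have hc0 : 0 ≤ c := Int.ediv_nonneg (by linarith) (by omega)
  exact aFindY_from curY dx dy x c hdx hc1 hc2 hcd (dy + 1).toNat 0 (by omega) hc0

-- A's inner x-loop over any list of x's in [1, dx] is B's two extends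
theorem aLoopX_closed (curX curY dx dy : Int) (hdx : 0 < dx) (hdy : 0 ≤ dy) :
    ∀ (l : List Int) (xs ys : List Int), (∀ x ∈ l, 1 ≤ x ∧ x ≤ dx) →
    aLoopX curX curY dx dy l (xs, ys) =
      (xs ++ l.map (fun x => curX + x),
       ys ++ l.map (fun x => curY + PySem.Int.floordiv (x * dy + dx - 1) dx)) := by
  intro l
  induction l with
  | nil => intro xs ys _; simp [aLoopX]
  | cons x rest ih =>
      intro xs ys hmem
      have hx := hmem x (List.mem_cons_self)
      simp only [aLoopX, aFindY_closed curY dx dy x hdx hdy hx.1 hx.2]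
      rw [ih _ _ (fun z hz => hmem z (List.mem_cons_of_mem _ hz))]
      simp [List.append_assoc]

-- A's outer loop equals B's outer loop on the same index list
theorem loopI_eq (rX rY : List Int) :
    ∀ (ks : List Nat) (xs ys : List Int),
    (∀ i ∈ ks, ¬(0 < rX.getD (i + 1) 0 - rX.getD i 0 ∧ rY.getD (i + 1) 0 - rY.getD i 0 < 0)) →
    aLoopI rX rY (List.map (fun i : Nat => (i : Int)) ks) (xs, ys) = bLoopI rX rY ks (xs, ys) := by
  intro ks
  induction ks with
  | nil => intro xs ys _; rfl
  | cons i rest ih =>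
      intro xs ys h
      have hi := h i List.mem_cons_self
      rw [List.map_cons]
      have e1 : PySem.List.pyGetD rX ((i : Int) + 1) 0 = rX.getD (i + 1) 0 := by
        rw [show ((i : Int) + 1) = ((i + 1 : Nat) : Int) by push_cast; ring,
          PySem.List.pyGetD_natCast]
      have e2 : PySem.List.pyGetD rX (i : Int) 0 = rX.getD i 0 :=
        PySem.List.pyGetD_natCast rX i 0
      have e3 : PySem.List.pyGetD rY ((i : Int) + 1) 0 = rY.getD (i + 1) 0 := by
        rw [show ((i : Int) + 1) = ((i + 1 : Nat) : Int) by push_cast; ring,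
          PySem.List.pyGetD_natCast]
      have e4 : PySem.List.pyGetD rY (i : Int) 0 = rY.getD i 0 :=
        PySem.List.pyGetD_natCast rY i 0
      simp only [aLoopI, bLoopI, e1, e2, e3, e4]
      set dx : Int := rX.getD (i + 1) 0 - rX.getD i 0 with hdxdef
      set dy : Int := rY.getD (i + 1) 0 - rY.getD i 0 with hdydef
      by_cases hdx : 0 < dx
      · have hdy : 0 ≤ dy := by
          by_contra hcon
          exact hi ⟨hdx, by omega⟩
        rw [aLoopX_closed _ _ _ _ hdx hdy _ xs ys
            (fun z hz => by rw [PySem.List.mem_pyRange_one] at hz; omega),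
          if_pos hdx]
        exact ih _ _ (fun j hj => h j (List.mem_cons_of_mem _ hj))
      · rw [PySem.List.pyRange_one_eq_nil (by omega)]
        simp only [aLoopX]
        rw [if_neg hdx]
        exact ih _ _ (fun j hj => h j (List.mem_cons_of_mem _ hj))

-- B's loop keeps the two lists nonempty and of equal length
theorem bLoopI_shape (rX rY : List Int) :
    ∀ (ks : List Nat) (xs ys : List Int), xs ≠ [] → xs.length = ys.length →
    (bLoopI rX rY ks (xs, ys)).1 ≠ [] ∧
    (bLoopI rX rY ks (xs, ys)).1.length = (bLoopI rX rY ks (xs, ys)).2.length := by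
  intro ks
  induction ks with
  | nil => intro xs ys h1 h2; exact ⟨h1, h2⟩
  | cons i rest ih =>
      intro xs ys h1 h2
      simp only [bLoopI]
      split_ifs with hdx
      · exact ih _ _ (by simp [h1]) (by simp [h2])
      · exact ih _ _ h1 h2

-- A's descending mirror loop is reverse-of-tail
theorem mirror_desc (l : List Int) (f : Int → Int) (acc : List Int) :
    (PySem.List.pyRange ((l.length : Int) - 1) 0 (-1)).foldl
      (fun a i => a ++ [f (PySem.List.pyGetD l i 0)]) acc =
    acc ++ (l.drop 1).reverse.map f := by
  rw [PySem.List.pyRange_neg_one, List.foldl_map,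
    PySem.List.foldl_append_singleton_eq_map]
  congr 1
  have hT : ((l.length : Int) - 1 - 0).toNat = l.length - 1 := by omega
  rw [hT]
  apply List.ext_getElem
  · simp
  · intro i h1 h2
    have hL : i < l.length - 1 := by
      simpa using h1
    simp only [List.getElem_map, List.getElem_range, List.getElem_reverse,
      List.getElem_drop, List.length_drop]
    have hidx : ((l.length : Int) - 1 - (i : Int)) = ((l.length - 1 - i : Nat) : Int) := by
      omega
    rw [hidx, PySem.List.pyGetD_natCast, List.getD_eq_getElem l 0 (by omega)]
    congr 1
    exact getElem_congr_idx (by omega)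

-- descending loop, bound given by a list of the same length, concrete appended values
theorem mirror_desc_neg (n : Nat) (l : List Int) (h : n = l.length) (acc : List Int) :
    (PySem.List.pyRange ((n : Int) - 1) 0 (-1)).foldl
      (fun a i => a ++ [PySem.List.pyGetD l i 0 * -1]) acc =
    acc ++ (l.drop 1).reverse.map (fun v => -v) := by
  subst h
  have := mirror_desc l (fun v => v * -1) acc
  simpa [mul_neg_one] using this

theorem mirror_desc_id (n : Nat) (l : List Int) (h : n = l.length) (acc : List Int) :
    (PySem.List.pyRange ((n : Int) - 1) 0 (-1)).foldl
      (fun a i => a ++ [PySem.List.pyGetD l i 0]) acc =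
    acc ++ (l.drop 1).reverse := by
  subst h
  have := mirror_desc l (fun v => v) acc
  simpa using this

-- A's ascending copy loop is the list itself
theorem mirror_asc_id (n : Nat) (l : List Int) (h : n = l.length) (acc : List Int) :
    (PySem.List.pyRange 0 (n : Int) 1).foldl
      (fun a i => a ++ [PySem.List.pyGetD l i 0]) acc = acc ++ l := by
  subst h
  rw [PySem.List.pyRange_one, List.foldl_map,
    PySem.List.foldl_append_singleton_eq_map]
  congr 1
  have hT : ((l.length : Int) - 0).toNat = l.length := by omega
  rw [hT]
  apply List.ext_getElem
  · simp
  · intro i h1 h2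
    have hL : i < l.length := by simpa using h1
    simp only [List.getElem_map, List.getElem_range]
    have hidx : ((0 : Int) + (i : Int)) = ((i : Nat) : Int) := by omega
    rw [hidx]
    rw [PySem.List.pyGetD_natCast, List.getD_eq_getElem l 0 (by omega)]

-- the slice plotX[(len-1)//2 : len] is a drop
theorem slice_right (l : List Int) :
    PySem.List.slice l (some (((l.length - 1) / 2 : Nat) : Int)) (some ((l.length : Nat) : Int)) =
      l.drop ((l.length - 1) / 2) := by
  rw [PySem.List.slice_natCast]
  exact List.take_of_length_le (by simp)

-- range(len(rX)-1) as A's Int index list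
theorem idx_list (n : Nat) :
    PySem.List.pyRange 0 ((n : Int) - 1) 1 =
      List.map (fun i : Nat => (i : Int)) (List.range (n - 1)) := by
  rw [PySem.List.pyRange_one]
  have hT : ((n : Int) - 1 - 0).toNat = n - 1 := by omega
  rw [hT]
  simp

-- ===== VERDICT (by name: the statement is the Claim_ definition above) =====
theorem getAllData_spec : Claim_equal_getAllData := by
  intro plotX plotY _ hpre
  unfold Pre_getAllData at hpre
  unfold Spec_getAllData
  simp only [getAllData, getAllData_alt, slice_right]
  set rX := plotX.drop ((plotX.length - 1) / 2) with hrX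
  set rY := plotY.drop ((plotY.length - 1) / 2) with hrY
  rw [idx_list, loopI_eq rX rY _ [0] [0] (fun i hi => by
    rw [List.mem_range] at hi
    exact (hpre i hi).2)]
  set st := bLoopI rX rY (List.range (rX.length - 1)) ([0], [0]) with hst
  obtain ⟨hne, hlen⟩ :=
    bLoopI_shape rX rY (List.range (rX.length - 1)) [0] [0] (by simp) (by simp)
  rw [← hst] at hne hlen
  rw [PySem.List.foldl_prod_mk
      (f := fun a (i : Int) => a ++ [PySem.List.pyGetD st.1 i 0 * -1])
      (g := fun a (i : Int) => a ++ [PySem.List.pyGetD st.2 i 0]),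
    mirror_desc_neg st.1.length st.1 rfl, mirror_desc_id st.1.length st.2 hlen,
    PySem.List.foldl_prod_mk
      (f := fun a (i : Int) => a ++ [PySem.List.pyGetD st.1 i 0])
      (g := fun a (i : Int) => a ++ [PySem.List.pyGetD st.2 i 0]),
    mirror_asc_id st.1.length st.1 rfl, mirror_asc_id st.1.length st.2 hlen]
  simp
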